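-- pv_equiv track=rewrite | github.com/JonatanRasmussen/DTU-02180-Group-44-BeliefProject | jonatan_main_v2.py | world_interpretation_has_no_contradiction
-- ===== SOURCE A (Python) =====
-- def world_interpretation_has_no_contradiction(belief, my_dict):
--     and_split = belief.split('&')
--     for subbelief in and_split:
--         or_split = subbelief.split('|')
--         true_found = False
--         for subsubbelief in or_split:
--             if subsubbelief[-1] not in my_dict:
--                 my_dict[subsubbelief[-1]] = evaluate(subsubbelief)
--                 true_found = True
--             if my_dict[subsubbelief[-1]] == evaluate(subsubbelief):
--                 true_found = True
--         if not true_found: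
--             return False
--     return True
--
-- def evaluate(element):
--     if element[0] == "~":
--         return False
--     else:
--         return True
-- ===== SOURCE B (Python) =====
-- def world_interpretation_has_no_contradiction(belief, my_dict):
--     # Global strategy: build the COMPLETE first-seen assignment over every literal
--     # of every clause first, then judge all clauses at once against that fixed
--     # assignment (a value, once assigned, never changes, and each clause's check
--     # only reads keys its own literals introduced no later than that clause).
--     clauses = [subbelief.split('|') for subbelief in belief.split('&')]
--     for lit in (l for cl in clauses for l in cl):
--         if lit[-1] not in my_dict:
--             my_dict[lit[-1]] = evaluate(lit)
--     return all(any(my_dict[l[-1]] == evaluate(l) for l in cl) for cl in clauses)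
--
-- def evaluate(element):
--     if element[0] == "~":
--         return False
--     else:
--         return True
-- ===== Notes on version B (the rewrite author's own statement) =====
-- stated objective: alternative
-- what changed: A interleaves assignment and satisfiability testing clause by clause with a true_found flag and early return; B instead builds the complete first-seen assignment globally over all literals of all clauses in one pass, then judges every clause at once against that fixed assignment with all/any (correct because assigned values never change and a clause's keys are introduced no later than the clause itself).
-- outside the precondition, e.g. on world_interpretation_has_no_contradiction('~a&', {'a': True}): A returns False, B raises IndexError; on world_interpretation_has_no_contradiction('a&', {}): A raises IndexError, B raises IndexError
import Mathlib
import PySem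

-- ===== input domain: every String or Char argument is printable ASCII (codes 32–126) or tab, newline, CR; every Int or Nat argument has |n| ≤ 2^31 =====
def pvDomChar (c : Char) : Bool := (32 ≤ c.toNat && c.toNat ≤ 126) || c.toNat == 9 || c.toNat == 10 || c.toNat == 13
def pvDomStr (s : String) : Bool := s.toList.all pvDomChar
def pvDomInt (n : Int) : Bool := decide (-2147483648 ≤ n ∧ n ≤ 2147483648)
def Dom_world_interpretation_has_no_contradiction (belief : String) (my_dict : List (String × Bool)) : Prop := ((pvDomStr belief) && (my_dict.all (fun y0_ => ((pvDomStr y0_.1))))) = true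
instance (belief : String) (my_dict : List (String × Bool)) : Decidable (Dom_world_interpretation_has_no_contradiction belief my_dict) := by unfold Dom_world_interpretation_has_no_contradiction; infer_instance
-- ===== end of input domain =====

-- B builds the complete first-seen assignment globally, then judges all clauses against it; equivalence
-- is about the RETURN value only (when A returns False early it leaves later variables unassigned, while
-- B always populates my_dict from every clause — the side effect on my_dict can differ).

-- ===== PORT A =====
-- evaluate(element); on element = "" Python raises IndexError (excluded by Pre_), port returns true there
def pvEvaluate (element : String) : Bool :=
  if PySem.Str.pyGet? element 0 = some '~' then false else true

-- the dict key subsubbelief[-1] as a 1-character string; on "" Python raises IndexError (excluded by Pre_)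
def pvKey (lit : String) : String :=
  match PySem.Str.pyGet? lit (-1) with
  | some c => String.ofList [c]
  | none => ""

-- one iteration of A's inner for-loop, threading (my_dict, true_found); my_dict[k] read via getD — the key
-- is always present at that point (inserted by the branch just above when absent), so getD is exact
def pvStepA (st : PySem.Dict String Bool × Bool) (lit : String) :
    PySem.Dict String Bool × Bool :=
  let st := if (st.1).contains (pvKey lit) then st
            else ((st.1).insert (pvKey lit) (pvEvaluate lit), true)
  if (st.1).getD (pvKey lit) false == pvEvaluate lit then (st.1, true) else st

-- A's inner for-loop over or_split
def pvClauseA (lits : List String) (st : PySem.Dict String Bool × Bool) :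
    PySem.Dict String Bool × Bool :=
  lits.foldl pvStepA st

-- A's outer for-loop over and_split with the early 'return False'
def pvAndA (clauses : List String) (d : PySem.Dict String Bool) : Bool :=
  match clauses with
  | [] => true
  | c :: rest =>
    let st := pvClauseA ((PySem.Str.split? c "|").getD []) (d, false)
    if !st.2 then false else pvAndA rest st.1

def world_interpretation_has_no_contradiction (belief : String) (my_dict : List (String × Bool)) : Bool :=
  pvAndA ((PySem.Str.split? belief "&").getD []) (PySem.Dict.mk my_dict)

-- ===== PORT B =====
-- B's populate step over the literals of one clause (the flat generator visits clauses in order)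
def pvPopulate (lits : List String) (d : PySem.Dict String Bool) : PySem.Dict String Bool :=
  lits.foldl (fun d lit =>
    if d.contains (pvKey lit) then d else d.insert (pvKey lit) (pvEvaluate lit)) d

-- B's per-clause check against the completed assignment (keys are present after the global pass, so getD is exact)
def pvCheck (d : PySem.Dict String Bool) (lits : List String) : Bool :=
  lits.any (fun lit => d.getD (pvKey lit) false == pvEvaluate lit)

def world_interpretation_has_no_contradiction_alt (belief : String) (my_dict : List (String × Bool)) : Bool :=
  let clauses := ((PySem.Str.split? belief "&").getD []).map
    (fun c => (PySem.Str.split? c "|").getD [])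
  let d := clauses.foldl (fun d lits => pvPopulate lits d) (PySem.Dict.mk my_dict)
  clauses.all (pvCheck d)

-- ===== PRECONDITION & SPEC =====
-- Pre_ excludes exactly the beliefs containing an empty '&'/'|'-literal: there Python A raises
-- IndexError unless an earlier clause already fails (cites in claim.json), and B itself raises.
def Pre_world_interpretation_has_no_contradiction (belief : String) (my_dict : List (String × Bool)) : Prop :=
  ∀ c ∈ (PySem.Str.split? belief "&").getD [],
    ∀ lit ∈ (PySem.Str.split? c "|").getD [], lit ≠ ""
instance (belief : String) (my_dict : List (String × Bool)) : Decidable (Pre_world_interpretation_has_no_contradiction belief my_dict) := by unfold Pre_world_interpretation_has_no_contradiction; infer_instance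

def pvWitness_world_interpretation_has_no_contradiction : String × (List (String × Bool)) :=
  ("a&~b|c", [("b", true)])

def Spec_world_interpretation_has_no_contradiction (belief : String) (my_dict : List (String × Bool)) (out : Bool) : Prop := out = world_interpretation_has_no_contradiction_alt belief my_dict
instance (belief : String) (my_dict : List (String × Bool)) (out : Bool) : Decidable (Spec_world_interpretation_has_no_contradiction belief my_dict out) := by unfold Spec_world_interpretation_has_no_contradiction; infer_instance

-- ===== CLAIM (what is proved, stated in full; the proofs are below) =====
def Claim_equal_world_interpretation_has_no_contradiction : Prop := ∀ (belief : String) (my_dict : List (String × Bool)), Dom_world_interpretation_has_no_contradiction belief my_dict → Pre_world_interpretation_has_no_contradiction belief my_dict → Spec_world_interpretation_has_no_contradiction belief my_dict (world_interpretation_has_no_contradiction belief my_dict)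

-- ===== LEMMAS AND PROOFS =====

lemma pvStepA_of_contains (d : PySem.Dict String Bool) (tf : Bool) (lit : String)
    (h : d.contains (pvKey lit) = true) :
    pvStepA (d, tf) lit = (d, if d.getD (pvKey lit) false == pvEvaluate lit then true else tf) := by
  by_cases hc : (d.getD (pvKey lit) false == pvEvaluate lit) = true <;>
    simp [pvStepA, h, hc]

lemma pvStepA_of_not_contains (d : PySem.Dict String Bool) (tf : Bool) (lit : String)
    (h : d.contains (pvKey lit) = false) :
    pvStepA (d, tf) lit = (d.insert (pvKey lit) (pvEvaluate lit), true) := by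
  simp [pvStepA, h, PySem.Dict.getD_insert_self]

-- populate only adds absent keys: lookups of keys already present are unchanged …
lemma get?_pvPopulate (lits : List String) (d : PySem.Dict String Bool) (k : String)
    (hk : d.contains k = true) : (pvPopulate lits d).get? k = d.get? k := by
  induction lits generalizing d with
  | nil => rfl
  | cons lit rest ih =>
    have hcons : pvPopulate (lit :: rest) d = pvPopulate rest
        (if d.contains (pvKey lit) = true then d
         else d.insert (pvKey lit) (pvEvaluate lit)) := rfl
    by_cases h : d.contains (pvKey lit) = true
    · rw [hcons, if_pos h, ih d hk]
    · simp only [Bool.not_eq_true] at h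
      have hne : k ≠ pvKey lit := by rintro rfl; rw [hk] at h; cases h
      have h1 : (d.insert (pvKey lit) (pvEvaluate lit)).contains k = true := by
        simp [PySem.Dict.contains_insert, hk]
      rw [hcons, if_neg (by simp [h]), ih _ h1, PySem.Dict.get?_insert_of_ne _ _ hne]

-- … and present keys stay present
lemma contains_pvPopulate_mono (lits : List String) (d : PySem.Dict String Bool) (k : String)
    (hk : d.contains k = true) : (pvPopulate lits d).contains k = true := by
  induction lits generalizing d with
  | nil => exact hk
  | cons lit rest ih =>
    have hcons : pvPopulate (lit :: rest) d = pvPopulate rest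
        (if d.contains (pvKey lit) = true then d
         else d.insert (pvKey lit) (pvEvaluate lit)) := rfl
    rw [hcons]
    split_ifs with h
    · exact ih d hk
    · exact ih _ (by simp [PySem.Dict.contains_insert, hk])

-- after the populate pass over a clause, every literal's key is assigned
lemma contains_pvPopulate_self (lits : List String) (d : PySem.Dict String Bool) (lit : String)
    (hm : lit ∈ lits) : (pvPopulate lits d).contains (pvKey lit) = true := by
  induction lits generalizing d with
  | nil => cases hm
  | cons l rest ih =>
    have hcons : pvPopulate (l :: rest) d = pvPopulate rest
        (if d.contains (pvKey l) = true then d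
         else d.insert (pvKey l) (pvEvaluate l)) := rfl
    rw [hcons]
    rcases List.mem_cons.mp hm with rfl | hm
    · split_ifs with h
      · exact contains_pvPopulate_mono rest d _ h
      · exact contains_pvPopulate_mono rest _ _ (PySem.Dict.contains_insert_self _ _ _)
    · split_ifs with h
      · exact ih d hm
      · exact ih _ hm

lemma getD_pvPopulate (lits : List String) (d : PySem.Dict String Bool) (k : String)
    (hk : d.contains k = true) : (pvPopulate lits d).getD k false = d.getD k false := by
  rw [PySem.Dict.getD_eq_get?_getD, PySem.Dict.getD_eq_get?_getD, get?_pvPopulate lits d k hk]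

-- the later clauses' populate passes never change a key that is already assigned
lemma getD_foldl_populate (cls : List (List String)) (d : PySem.Dict String Bool) (k : String)
    (hk : d.contains k = true) :
    (cls.foldl (fun d lits => pvPopulate lits d) d).getD k false = d.getD k false := by
  induction cls generalizing d with
  | nil => rfl
  | cons c rest ih =>
    simp only [List.foldl_cons]
    rw [ih _ (contains_pvPopulate_mono c d k hk), getD_pvPopulate c d k hk]

-- A's interleaved clause loop = populate first, then the any() check over the populated dict
lemma pvClauseA_eq (lits : List String) (d : PySem.Dict String Bool) (tf : Bool) :
    pvClauseA lits (d, tf) =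
      (pvPopulate lits d, tf || pvCheck (pvPopulate lits d) lits) := by
  induction lits generalizing d tf with
  | nil => simp [pvClauseA, pvPopulate, pvCheck]
  | cons lit rest ih =>
    have hconsA : pvClauseA (lit :: rest) (d, tf) = pvClauseA rest (pvStepA (d, tf) lit) := rfl
    have hconsP : pvPopulate (lit :: rest) d = pvPopulate rest
        (if d.contains (pvKey lit) = true then d
         else d.insert (pvKey lit) (pvEvaluate lit)) := rfl
    rw [hconsA, hconsP]
    simp only [pvCheck, List.any_cons]
    by_cases h : d.contains (pvKey lit) = true
    · rw [pvStepA_of_contains d tf lit h, if_pos h, ih,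
        getD_pvPopulate rest d _ h]
      by_cases hc : (d.getD (pvKey lit) false == pvEvaluate lit) = true
      · simp [pvCheck, hc]
      · simp only [Bool.not_eq_true] at hc
        simp [pvCheck, hc]
    · simp only [Bool.not_eq_true] at h
      rw [pvStepA_of_not_contains d tf lit h, if_neg (by simp [h]), ih]
      have hcont : (d.insert (pvKey lit) (pvEvaluate lit)).contains (pvKey lit) = true :=
        PySem.Dict.contains_insert_self _ _ _
      rw [getD_pvPopulate rest _ _ hcont, PySem.Dict.getD_insert_self]
      simp [pvCheck]

-- any over the same list with pointwise-equal predicates (membership-restricted congruence)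
lemma pvAny_congr {α : Type} (l : List α) (p q : α → Bool) (h : ∀ a ∈ l, p a = q a) :
    l.any p = l.any q := by
  induction l with
  | nil => rfl
  | cons a t ih =>
    simp only [List.any_cons, h a List.mem_cons_self,
      ih (fun x hx => h x (List.mem_cons_of_mem a hx))]

-- a clause's check reads only its own keys, which its populate pass assigned, so it may equally
-- be run against the globally populated dict
lemma pvCheck_foldl (lits : List String) (cls : List (List String)) (d : PySem.Dict String Bool) :
    pvCheck (cls.foldl (fun d lits => pvPopulate lits d) (pvPopulate lits d)) lits
      = pvCheck (pvPopulate lits d) lits := by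
  unfold pvCheck
  refine pvAny_congr _ _ _ (fun lit hm => ?_)
  rw [getD_foldl_populate cls _ _ (contains_pvPopulate_self lits d lit hm)]

-- A's sequential early-return loop = global populate then all/any
lemma pvAnd_eq (clauses : List String) (d : PySem.Dict String Bool) :
    pvAndA clauses d =
      (clauses.map (fun c => (PySem.Str.split? c "|").getD [])).all
        (pvCheck ((clauses.map (fun c => (PySem.Str.split? c "|").getD [])).foldl
          (fun d lits => pvPopulate lits d) d)) := by
  induction clauses generalizing d with
  | nil => rfl
  | cons c rest ih =>
    simp only [pvAndA, List.map_cons, List.foldl_cons, List.all_cons, pvClauseA_eq,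
      Bool.false_or, pvCheck_foldl]
    by_cases h : pvCheck (pvPopulate ((PySem.Str.split? c "|").getD []) d)
        ((PySem.Str.split? c "|").getD []) = true
    · simp only [h, Bool.not_true, Bool.false_eq_true, if_false, Bool.true_and]
      exact ih _
    · simp only [Bool.not_eq_true] at h
      simp [h]

-- ===== VERDICT (by name: the statement is the Claim_ definition above) =====
theorem world_interpretation_has_no_contradiction_spec : Claim_equal_world_interpretation_has_no_contradiction := by
  intro belief my_dict _ _
  unfold Spec_world_interpretation_has_no_contradiction
  unfold world_interpretation_has_no_contradiction world_interpretation_has_no_contradiction_alt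
  exact pvAnd_eq _ _
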